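-- pv_equiv track=rewrite | github.com/august-hw2/24_Programmers_Python_Basics | 프로그래머스/0/181833. 특별한 이차원 배열 1/특별한 이차원 배열 1.py | solution
-- ===== SOURCE A (Python) =====
-- def solution(n):
--
--     arr = []
--     temp = []
--
--     for i in range(n):
--
--         for j in range(n):
--
--             temp.append(1) if i == j else temp.append(0)
--
--         arr.append(temp)
--
--         temp = []
--
--     return arr
-- ===== SOURCE B (Python) =====
-- def solution(n):
--     flat = ([1] + [0] * n) * n
--     return [flat[i * n : i * n + n] for i in range(n)]
-- ===== Notes on version B (the rewrite author's own statement) =====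
-- stated objective: alternative
-- what changed: Replaces A's nested per-cell i==j branch loop with one flat periodic list (a one followed by n zeros, repeated n times) from which each row is cut by a strided slice of width n starting at i*n; i*n+i = i*(n+1) is the unique multiple of the period n+1 in that window.
import Mathlib
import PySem

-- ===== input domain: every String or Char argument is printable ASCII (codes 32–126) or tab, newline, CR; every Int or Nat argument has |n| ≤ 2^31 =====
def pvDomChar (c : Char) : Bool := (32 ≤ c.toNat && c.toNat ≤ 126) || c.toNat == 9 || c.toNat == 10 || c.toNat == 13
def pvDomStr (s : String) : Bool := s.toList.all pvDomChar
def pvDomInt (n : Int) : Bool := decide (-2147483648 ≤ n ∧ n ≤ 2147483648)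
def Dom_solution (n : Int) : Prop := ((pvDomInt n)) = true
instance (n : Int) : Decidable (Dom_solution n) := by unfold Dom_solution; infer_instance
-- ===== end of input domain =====

-- B builds one flat periodic list ([1]+[0]*n)*n and cuts the rows out of it by
-- strided slicing (row i = flat[i*n : i*n+n]) instead of A's nested per-cell
-- i==j branch loop (objective: alternative).

-- ===== PORT A =====
def solution (n : Int) : List (List Int) :=
  (PySem.List.pyRange 0 n 1).foldl
    (fun arr i =>
      let temp := (PySem.List.pyRange 0 n 1).foldl
        (fun temp j => if i == j then temp ++ [(1 : Int)] else temp ++ [(0 : Int)]) []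
      arr ++ [temp]) []

-- ===== PORT B =====
def solution_alt (n : Int) : List (List Int) :=
  let flat := List.flatten (List.replicate n.toNat ([(1 : Int)] ++ List.replicate n.toNat (0 : Int)))
  (PySem.List.pyRange 0 n 1).map
    (fun i => PySem.List.slice flat (some (i * n)) (some (i * n + n)))

-- ===== PRECONDITION & SPEC =====
def Spec_solution (n : Int) (out : List (List Int)) : Prop := out = solution_alt n
instance (n : Int) (out : List (List Int)) : Decidable (Spec_solution n out) := by unfold Spec_solution; infer_instance

-- ===== CLAIM (what is proved, stated in full; the proofs are below) =====
def Claim_equal_solution : Prop := ∀ (n : Int), Dom_solution n → Spec_solution n (solution n)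

-- ===== LEMMAS AND PROOFS =====

-- A's value as a map of maps over the Nat range
theorem solution_eq_map (n : Int) :
    solution n = (List.range n.toNat).map
      (fun i => (List.range n.toNat).map (fun j => if i = j then (1 : Int) else 0)) := by
  unfold solution
  have hstep : ∀ i : Int, (fun (temp : List Int) (j : Int) =>
      if i == j then temp ++ [(1:Int)] else temp ++ [(0:Int)])
      = fun temp j => temp ++ [if i == j then (1:Int) else 0] := by
    intro i; funext temp j; by_cases h : i == j <;> simp [h]
  simp only [hstep, PySem.List.foldl_append_singleton_eq_map, List.nil_append]
  rw [PySem.List.pyRange_one]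
  simp only [sub_zero, zero_add, List.map_map, Function.comp_def]
  refine List.map_congr_left (fun i _ => ?_)
  refine List.map_congr_left (fun j _ => ?_)
  by_cases h : i = j <;> simp [h]

-- the identity matrix of size N as a map of maps
def idm (N : Nat) : List (List Int) :=
  (List.range N).map (fun i => (List.range N).map (fun j => if i = j then (1 : Int) else 0))


theorem flat_len (N m : Nat) :
    (List.flatten (List.replicate m ((1:Int) :: List.replicate N 0))).length = m * (N + 1) := by
  simp [List.map_replicate, List.sum_replicate, smul_eq_mul]

theorem getElem_flat (N : Nat) : ∀ (m j : Nat)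
    (h : j < (List.flatten (List.replicate m ((1:Int) :: List.replicate N 0))).length),
    (List.flatten (List.replicate m ((1:Int) :: List.replicate N 0)))[j]
      = if j % (N + 1) = 0 then (1:Int) else 0 := by
  intro m
  induction m with
  | zero => intro j h; simp at h
  | succ m ih =>
    intro j h
    simp only [List.replicate_succ, List.flatten_cons]
    by_cases hj : j < N + 1
    · rw [List.getElem_append_left (by simpa using hj)]
      rw [Nat.mod_eq_of_lt hj]
      cases j with
      | zero => simp
      | succ jj => simp [List.getElem_cons_succ]
    · have hj' : ((1:Int) :: List.replicate N 0).length ≤ j := by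
        simp only [List.length_cons, List.length_replicate]; omega
      rw [List.getElem_append_right hj']
      have e : (m + 1) * (N + 1) = m * (N + 1) + (N + 1) := by ring
      have hb : j - ((1:Int) :: List.replicate N 0).length
          < (List.flatten (List.replicate m ((1:Int) :: List.replicate N 0))).length := by
        rw [flat_len]
        simp only [List.length_cons, List.length_replicate]
        rw [flat_len] at h; omega
      rw [ih _ hb]
      simp only [List.length_cons, List.length_replicate]
      conv_rhs => rw [Nat.mod_eq_sub_mod (show N + 1 ≤ j by omega)]

theorem row_slice (N k : Nat) (hk : k < N) :
    (((List.flatten (List.replicate N ((1:Int) :: List.replicate N 0))).drop (k * N)).take N)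
      = (List.range N).map (fun j => if k = j then (1:Int) else 0) := by
  apply List.ext_getElem
  · rw [List.length_take, List.length_drop, flat_len, List.length_map, List.length_range]
    have h6 : (k + 1) * N ≤ N * N := Nat.mul_le_mul (by omega) (le_refl N)
    have h7 : (k + 1) * N = k * N + N := by ring
    have h8 : N * (N + 1) = N * N + N := by ring
    omega
  · intro j h1 h2
    simp only [List.length_take, List.length_drop, flat_len] at h1
    rw [List.getElem_take, List.getElem_drop]
    rw [getElem_flat N N (k * N + j) (by
      rw [flat_len]
      have h6 : (k + 1) * N ≤ N * N := Nat.mul_le_mul (by omega) (le_refl N)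
      have h7 : (k + 1) * N = k * N + N := by ring
      have h8 : N * (N + 1) = N * N + N := by ring
      omega)]
    simp only [List.getElem_map, List.getElem_range]
    simp only [List.length_map, List.length_range] at h2
    by_cases hkj : k = j
    · subst hkj
      have he : k * N + k = k * (N + 1) := by ring
      rw [he, if_pos (Nat.mul_mod_left _ _), if_pos rfl]
    · rw [if_neg hkj]
      have hne : (k * N + j) % (N + 1) ≠ 0 := by
        rcases Nat.lt_or_ge k j with hlt | hge
        · have he : k * N + j = (N + 1) * k + (j - k) := by
            have : (N + 1) * k = k * N + k := by ring
            omega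
          rw [he, Nat.mul_add_mod, Nat.mod_eq_of_lt (by omega)]
          omega
        · have hgt : j < k := by omega
          obtain ⟨k', rfl⟩ : ∃ k', k = k' + 1 := ⟨k - 1, by omega⟩
          have he : (k' + 1) * N + j = (N + 1) * k' + (N + 1 - (k' + 1) + j) := by
            have h3 : (N + 1) * k' = k' * N + k' := by ring
            have h4 : (k' + 1) * N = k' * N + N := by ring
            omega
          rw [he, Nat.mul_add_mod, Nat.mod_eq_of_lt (by omega)]
          omega
      rw [if_neg hne]

-- B equals the identity matrix of size n.toNat
theorem alt_eq (n : Int) : solution_alt n = idm n.toNat := by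
  unfold solution_alt idm
  by_cases hn : n ≤ 0
  · have h0 : n.toNat = 0 := by omega
    have h1 : PySem.List.pyRange 0 n 1 = [] := by
      rw [PySem.List.pyRange_one]
      rw [show (n - 0).toNat = 0 from by omega]
      simp
    simp [h0, h1]
  · obtain ⟨N, rfl⟩ : ∃ N : Nat, n = (N : Int) := ⟨n.toNat, by omega⟩
    rw [PySem.List.pyRange_one]
    simp only [sub_zero, zero_add, List.map_map, Function.comp_def,
      List.cons_append, List.nil_append, Int.toNat_natCast]
    refine List.map_congr_left (fun k hk => ?_)
    rw [List.mem_range] at hk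
    have e1 : (↑k : Int) * ↑N = ((k * N : Nat) : Int) := by push_cast; ring
    rw [e1, PySem.List.slice_natCast_add]
    exact row_slice N k hk

-- ===== VERDICT (by name: the statement is the Claim_ definition above) =====
theorem solution_spec : Claim_equal_solution := by
  intro n _
  show solution n = solution_alt n
  rw [solution_eq_map, alt_eq]
  rfl
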